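-- pv_equiv track=rewrite | github.com/ivan-dutov-work/int20h-2026-backend | scripts/normalize_seed_skills.py | split_skill_tokens
-- ===== SOURCE A (Python) =====
-- from typing import List, Tuple, Dict, Any
--
-- def split_skill_tokens(skills_str: str) -> List[str]:
--     tokens = []
--     cur = []
--     depth = 0
--     for ch in skills_str:
--         if ch == "(":
--             depth += 1
--             cur.append(ch)
--             continue
--         if ch == ")":
--             depth = max(0, depth - 1)
--             cur.append(ch)
--             continue
--         if ch == "," and depth == 0:
--             token = "".join(cur).strip()
--             if token:
--                 tokens.append(token)
--             cur = []
--             continue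
--         cur.append(ch)
--     last = "".join(cur).strip()
--     if last:
--         tokens.append(last)
--     out = []
--     for t in tokens:
--         parts = [p.strip() for p in t.split(";") if p.strip()]
--         out.extend(parts)
--     return out
-- ===== SOURCE B (Python) =====
-- from typing import List
--
-- SEP = "\x00"
--
-- def split_skill_tokens(skills_str: str) -> List[str]:
--     # Phase 1: rewrite the string, replacing every separator (a ',' at paren
--     # depth 0, or any ';') by a marker character.  Phase 2: a plain split on
--     # the marker, strip each piece, drop the empty ones.
--     marked = []
--     depth = 0
--     for ch in skills_str:
--         if ch == "(":
--             depth += 1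
--             marked.append(ch)
--         elif ch == ")":
--             depth = max(0, depth - 1)
--             marked.append(ch)
--         elif (ch == "," and depth == 0) or ch == ";":
--             marked.append(SEP)
--         else:
--             marked.append(ch)
--     return [p for p in (seg.strip() for seg in "".join(marked).split(SEP)) if p]
-- ===== Notes on version B (the rewrite author's own statement) =====
-- stated objective: alternative
-- what changed: B replaces A's stateful tokenizer (accumulate a current buffer, flush it on depth-0 commas, then re-split every token on ';') by a mark-then-split algorithm: one pass rewrites each separator (depth-0 ',' or any ';') into a marker character, then the result is split on the marker, stripped and filtered in a single comprehension.
import Mathlib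
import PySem

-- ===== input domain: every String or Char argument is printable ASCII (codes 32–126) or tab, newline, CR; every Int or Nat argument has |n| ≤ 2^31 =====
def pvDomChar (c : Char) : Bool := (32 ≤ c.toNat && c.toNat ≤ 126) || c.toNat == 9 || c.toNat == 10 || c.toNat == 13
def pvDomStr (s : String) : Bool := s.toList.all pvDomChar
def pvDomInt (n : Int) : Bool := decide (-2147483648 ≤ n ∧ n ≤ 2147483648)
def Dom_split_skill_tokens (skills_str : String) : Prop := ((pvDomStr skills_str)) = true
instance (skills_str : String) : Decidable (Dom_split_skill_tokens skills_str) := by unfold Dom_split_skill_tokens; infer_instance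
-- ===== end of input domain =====

-- B replaces A's stateful buffer-and-flush tokenizer (plus a second semicolon
-- pass) by mark-then-split: rewrite every separator into a marker character,
-- then split/strip/filter once; equal return values, no speed claim.

-- ===== PORT A =====
-- the body of A's character loop: state (tokens, cur, depth)
def pvStepA (st : List (List Char) × List Char × Int) (ch : Char) : List (List Char) × List Char × Int :=
  let (tokens, cur, depth) := st
  if ch = '(' then (tokens, cur ++ [ch], depth + 1)
  else if ch = ')' then (tokens, cur ++ [ch], max 0 (depth - 1))
  else if ch = ',' ∧ depth = 0 then
    let token := PySem.Chars.strip cur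
    ((if token ≠ [] then tokens ++ [token] else tokens), [], depth)
  else (tokens, cur ++ [ch], depth)

-- A's code after the loop: flush `cur`, then the second pass splitting each token on ';'
def pvFinishA (tokens : List (List Char)) (cur : List Char) : List String :=
  let last := PySem.Chars.strip cur
  let tokens := if last ≠ [] then tokens ++ [last] else tokens
  (tokens.foldl (fun out t =>
      out ++ ((PySem.Chars.splitOn t [';']).map PySem.Chars.strip).filter (· ≠ [])) []).map String.ofList

def split_skill_tokens (skills_str : String) : List String :=
  let st := skills_str.toList.foldl pvStepA ([], [], 0)
  pvFinishA st.1 st.2.1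

-- ===== PORT B =====
-- phase 1 of B: the marking loop, state (marked, depth); separators become '\x00'
def pvMark (st : List Char × Int) (ch : Char) : List Char × Int :=
  let (marked, depth) := st
  if ch = '(' then (marked ++ [ch], depth + 1)
  else if ch = ')' then (marked ++ [ch], max 0 (depth - 1))
  else if (ch = ',' ∧ depth = 0) ∨ ch = ';' then (marked ++ ['\x00'], depth)
  else (marked ++ [ch], depth)

-- phase 2 of B: split on the marker, strip each piece, keep the non-empty ones
def split_skill_tokens_alt (skills_str : String) : List String :=
  let marked := (skills_str.toList.foldl pvMark ([], 0)).1
  (((PySem.Chars.splitOn marked ['\x00']).map PySem.Chars.strip).filter (· ≠ [])).map String.ofList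

-- ===== PRECONDITION & SPEC =====
def Spec_split_skill_tokens (skills_str : String) (out : List String) : Prop := out = split_skill_tokens_alt skills_str
instance (skills_str : String) (out : List String) : Decidable (Spec_split_skill_tokens skills_str out) := by unfold Spec_split_skill_tokens; infer_instance

-- ===== CLAIM (what is proved, stated in full; the proofs are below) =====
def Claim_equal_split_skill_tokens : Prop := ∀ (skills_str : String), Dom_split_skill_tokens skills_str → Spec_split_skill_tokens skills_str (split_skill_tokens skills_str)

-- ===== LEMMAS AND PROOFS =====

-- proof-only intermediate: the single-pass tokenizer the two ports both refine
def pvStepB (st : List (List Char) × List Char × Int) (ch : Char) : List (List Char) × List Char × Int :=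
  let (out, buf, depth) := st
  if ch = '(' then (out, buf ++ [ch], depth + 1)
  else if ch = ')' then (out, buf ++ [ch], max 0 (depth - 1))
  else if (ch = ',' ∧ depth = 0) ∨ ch = ';' then
    let seg := PySem.Chars.strip buf
    ((if seg ≠ [] then out ++ [seg] else out), [], depth)
  else (out, buf ++ [ch], depth)

def pvFinishB (out : List (List Char)) (buf : List Char) : List String :=
  (if PySem.Chars.strip buf ≠ [] then out ++ [PySem.Chars.strip buf] else out).map String.ofList

-- `strip`/`clean` machinery ------------------------------------------------

-- what A's second pass does to one token, phrased over `List.splitOnP`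
def pvClean (t : List Char) : List (List Char) :=
  ((List.splitOnP (· == ';') t).map PySem.Chars.strip).filter (· ≠ [])

-- strip-and-drop-empties over a list of already-split segments
def pvCleanL (ss : List (List Char)) : List (List Char) :=
  (ss.map PySem.Chars.strip).filter (· ≠ [])

-- PySem's splitOn on a one-char separator is Mathlib's splitOnP
theorem pvGo_eq (c : Char) : ∀ (fuel : Nat) (l cur : List Char) (acc : List (List Char)), l.length < fuel →
    PySem.Chars.splitOn.go [c] fuel l cur acc
      = acc.reverse ++ (List.splitOnP (· == c) l).modifyHead (cur.reverse ++ ·) := by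
  intro fuel
  induction fuel with
  | zero => intro l cur acc h; omega
  | succ f ih =>
    intro l cur acc h
    cases l with
    | nil => simp [PySem.Chars.splitOn.go]
    | cons a rest =>
      rw [PySem.Chars.splitOn.go]
      by_cases hac : a = c
      · subst hac
        rw [if_pos (by simp)]
        rw [show List.drop [a].length (a :: rest) = rest by simp]
        rw [ih rest [] _ (by simpa using Nat.lt_of_succ_lt_succ h)]
        simp [List.splitOnP_cons]
        exact congrFun List.modifyHead_id _
      · rw [if_neg (by simp [List.isPrefixOf]; exact fun hh => (hac hh.symm).elim)]
        rw [ih rest (a :: cur) acc (by simpa using Nat.lt_of_succ_lt_succ h)]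
        have hbe : ((· == c) a) = false := by simp [hac]
        simp [List.splitOnP_cons, hbe, List.modifyHead_modifyHead]
        rfl

theorem pvSplitOn_eq (c : Char) (l : List Char) :
    PySem.Chars.splitOn l [c] = List.splitOnP (· == c) l := by
  rw [PySem.Chars.splitOn, pvGo_eq c (l.length+1) l [] [] (by omega)]
  simp
  exact congrFun List.modifyHead_id _

theorem pvStrip_cons_space {a : Char} (h : PySem.Chars.isspace a = true) (xs : List Char) :
    PySem.Chars.strip (a :: xs) = PySem.Chars.strip xs := by
  simp [PySem.Chars.strip, PySem.Chars.lstrip, h]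

theorem pvRstrip_snoc_space {a : Char} (h : PySem.Chars.isspace a = true) (xs : List Char) :
    PySem.Chars.rstrip (xs ++ [a]) = PySem.Chars.rstrip xs := by
  simp [PySem.Chars.rstrip, h]

theorem pvStrip_snoc_space {a : Char} (h : PySem.Chars.isspace a = true) (xs : List Char) :
    PySem.Chars.strip (xs ++ [a]) = PySem.Chars.strip xs := by
  unfold PySem.Chars.strip
  rw [PySem.Chars.lstrip, List.dropWhile_append]
  by_cases he : (List.dropWhile PySem.Chars.isspace xs).isEmpty
  · rw [if_pos he]
    have h1 : List.dropWhile PySem.Chars.isspace [a] = [] := by simp [h]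
    rw [h1]
    have h2 : List.dropWhile PySem.Chars.isspace xs = [] := by simpa [List.isEmpty_iff] using he
    rw [show PySem.Chars.lstrip xs = List.dropWhile PySem.Chars.isspace xs from rfl, h2]
  · rw [if_neg he]
    exact pvRstrip_snoc_space h _

theorem pvSplitOnP_snoc {α : Type} (p : α → Bool) (a : α) (h : p a = false) (l : List α) :
    List.splitOnP p (l ++ [a]) = (l.splitOnP p).modifyLast (· ++ [a]) := by
  induction l with
  | nil =>
    simp only [List.nil_append, List.splitOnP_cons, h, Bool.false_eq_true, if_false,
      List.splitOnP_nil, List.modifyHead_cons]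
    rw [show [([]:List α)] = [] ++ [([]:List α)] from rfl, List.modifyLast_concat]
    simp
  | cons x l ih =>
    by_cases hx : p x
    · simp only [List.cons_append, List.splitOnP_cons, hx, if_pos, ih]
      rw [show ([] : List α) :: (l.splitOnP p).modifyLast (· ++ [a])
            = [([] : List α)] ++ (l.splitOnP p).modifyLast (· ++ [a]) from rfl,
          show ([] : List α) :: l.splitOnP p = [([] : List α)] ++ l.splitOnP p from rfl,
          List.modifyLast_append_of_right_ne_nil _ _ _ (List.splitOnP_ne_nil _ _)]
    · simp only [List.cons_append, List.splitOnP_cons, hx, Bool.false_eq_true, if_false, ih]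
      rcases hsp : l.splitOnP p with - | ⟨z, zs⟩
      · exact absurd hsp (List.splitOnP_ne_nil _ _)
      · cases zs with
        | nil => rfl
        | cons z2 zs =>
          rw [show z :: z2 :: zs = [z] ++ (z2 :: zs) from rfl,
              List.modifyLast_append_of_right_ne_nil _ _ _ (by simp)]
          simp only [List.singleton_append, List.modifyHead_cons]
          rw [show (x::z) :: z2 :: zs = [x::z] ++ z2::zs from rfl,
              List.modifyLast_append_of_right_ne_nil _ _ _ (by simp)]
          rfl

theorem pvCleanL_modifyLast_space {a : Char} (h : PySem.Chars.isspace a = true)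
    (ss : List (List Char)) :
    pvCleanL (ss.modifyLast (· ++ [a])) = pvCleanL ss := by
  induction ss with
  | nil => rfl
  | cons z ws ih =>
    cases ws with
    | nil =>
      rw [show [z] = [] ++ [z] from rfl, List.modifyLast_concat]
      simp [pvCleanL, pvStrip_snoc_space h]
    | cons w ws =>
      rw [show z :: w :: ws = [z] ++ w :: ws from rfl,
          List.modifyLast_append_of_right_ne_nil _ _ _ (by simp)]
      simp only [List.singleton_append]
      simp only [pvCleanL, List.map_cons, List.filter_cons] at ih ⊢
      rw [ih]

theorem pvClean_cons_space {a : Char} (h : PySem.Chars.isspace a = true) (t : List Char) :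
    pvClean (a :: t) = pvClean t := by
  have hne : ((a == ';') : Bool) = false := by
    by_cases hc : a = ';'
    · subst hc; exact absurd h (by decide)
    · simp [hc]
  unfold pvClean
  rw [List.splitOnP_cons]
  simp only [hne, Bool.false_eq_true, if_false]
  rcases hsp : List.splitOnP (· == ';') t with - | ⟨h0, tl⟩
  · exact absurd hsp (List.splitOnP_ne_nil _ _)
  · simp [List.modifyHead_cons, pvStrip_cons_space h]

theorem pvClean_snoc_space {a : Char} (h : PySem.Chars.isspace a = true) (t : List Char) :
    pvClean (t ++ [a]) = pvClean t := by
  have hne : ((a == ';') : Bool) = false := by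
    by_cases hc : a = ';'
    · subst hc; exact absurd h (by decide)
    · simp [hc]
  show pvCleanL _ = pvCleanL _
  rw [pvSplitOnP_snoc (· == ';') a hne t, pvCleanL_modifyLast_space h]

theorem pvClean_lstrip (t : List Char) : pvClean (PySem.Chars.lstrip t) = pvClean t := by
  induction t with
  | nil => rfl
  | cons a t ih =>
    by_cases hw : PySem.Chars.isspace a = true
    · rw [show PySem.Chars.lstrip (a :: t) = PySem.Chars.lstrip t by
          simp [PySem.Chars.lstrip, hw], ih, pvClean_cons_space hw]
    · rw [show PySem.Chars.lstrip (a :: t) = a :: t by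
          simp [PySem.Chars.lstrip]; simp at hw; simp [hw]]

theorem pvClean_rstrip (t : List Char) : pvClean (PySem.Chars.rstrip t) = pvClean t := by
  induction t using List.reverseRecOn with
  | nil => rfl
  | append_singleton xs a ih =>
    by_cases hw : PySem.Chars.isspace a = true
    · rw [pvRstrip_snoc_space hw, ih, pvClean_snoc_space hw]
    · rw [show PySem.Chars.rstrip (xs ++ [a]) = xs ++ [a] by
          simp [PySem.Chars.rstrip]; simp at hw; simp [hw]]

theorem pvClean_strip (t : List Char) : pvClean (PySem.Chars.strip t) = pvClean t := by
  rw [show PySem.Chars.strip t = PySem.Chars.rstrip (PySem.Chars.lstrip t) from rfl,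
      pvClean_rstrip, pvClean_lstrip]

-- splitting the explicit "segments joined by ';'" shape
theorem pvSplitOnP_flat (segs : List (List Char)) (curB : List Char)
    (hs : ∀ s ∈ segs, ';' ∉ s) (hb : ';' ∉ curB) :
    List.splitOnP (· == ';') (segs.flatMap (· ++ [';']) ++ curB) = segs ++ [curB] := by
  induction segs with
  | nil =>
    simp only [List.flatMap_nil, List.nil_append]
    exact List.splitOnP_eq_single _ _ (fun x hx => by simp; rintro rfl; exact hb hx)
  | cons s rest ih =>
    have hs' : ∀ x ∈ s, ¬ ((x == ';') = true) := fun x hx => by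
      simp; rintro rfl; exact hs s (by simp) hx
    rw [List.flatMap_cons, List.append_assoc, List.append_assoc,
        show ([';'] : List Char) ++ (rest.flatMap (· ++ [';']) ++ curB)
          = ';' :: (rest.flatMap (· ++ [';']) ++ curB) from rfl,
        List.splitOnP_first _ _ hs' ';' (by simp),
        ih (fun t ht => hs t (by simp [ht]))]
    rfl

theorem pvClean_decomp (segs : List (List Char)) (curB : List Char)
    (hs : ∀ s ∈ segs, ';' ∉ s) (hb : ';' ∉ curB) :
    pvClean (segs.flatMap (· ++ [';']) ++ curB) = pvCleanL segs ++ pvCleanL [curB] := by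
  show pvCleanL _ = _
  rw [pvSplitOnP_flat segs curB hs hb]
  simp [pvCleanL, List.filter_append]

-- flushing a buffer, A-style and B-style
theorem pvFlushA (toks : List (List Char)) (x : List Char) :
    (if PySem.Chars.strip x ≠ [] then toks ++ [PySem.Chars.strip x] else toks).flatMap pvClean
      = toks.flatMap pvClean ++ pvClean x := by
  by_cases hx : PySem.Chars.strip x = []
  · simp only [hx, ne_eq, not_true_eq_false, if_false]
    have : pvClean x = [] := by
      rw [← pvClean_strip, hx]; rfl
    simp [this]
  · simp only [hx, ne_eq, not_false_eq_true, if_true, List.flatMap_append,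
      List.flatMap_cons, List.flatMap_nil, List.append_nil]
    rw [← pvClean_strip x]

theorem pvFlushB (out : List (List Char)) (x : List Char) :
    (if PySem.Chars.strip x ≠ [] then out ++ [PySem.Chars.strip x] else out)
      = out ++ pvCleanL [x] := by
  by_cases hx : PySem.Chars.strip x = [] <;>
    simp [pvCleanL, hx]

theorem pvFinishA_eq (tokens : List (List Char)) (cur : List Char) :
    pvFinishA tokens cur = ((tokens.flatMap pvClean) ++ pvClean cur).map String.ofList := by
  unfold pvFinishA
  simp only []
  rw [show (fun (out : List (List Char)) (t : List Char) =>
        out ++ ((PySem.Chars.splitOn t [';']).map PySem.Chars.strip).filter (· ≠ []))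
      = (fun out t => out ++ pvClean t) by
        funext out t
        rw [pvSplitOn_eq ';' t]
        rfl]
  rw [PySem.List.foldl_append_eq_flatMap pvClean _ []]
  rw [List.nil_append, pvFlushA]

-- A's loop refines the single-pass tokenizer
theorem pvMain (cs : List Char) : ∀ (tokA segs : List (List Char)) (curB : List Char) (d : Int),
    (∀ s ∈ segs, ';' ∉ s) → ';' ∉ curB →
    (let stA := cs.foldl pvStepA (tokA, segs.flatMap (· ++ [';']) ++ curB, d)
     let stB := cs.foldl pvStepB (tokA.flatMap pvClean ++ pvCleanL segs, curB, d)
     pvFinishA stA.1 stA.2.1 = pvFinishB stB.1 stB.2.1) := by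
  induction cs with
  | nil =>
    intro tokA segs curB d hs hb
    simp only [List.foldl_nil]
    rw [show pvFinishB (tokA.flatMap pvClean ++ pvCleanL segs) curB
          = ((tokA.flatMap pvClean ++ pvCleanL segs) ++ pvCleanL [curB]).map String.ofList by
        unfold pvFinishB; rw [pvFlushB]]
    rw [pvFinishA_eq, pvClean_decomp segs curB hs hb, List.append_assoc]
  | cons ch cs ih =>
    intro tokA segs curB d hs hb
    simp only [List.foldl_cons]
    by_cases h1 : ch = '('
    · subst h1
      rw [show pvStepA (tokA, segs.flatMap (· ++ [';']) ++ curB, d) '('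
            = (tokA, (segs.flatMap (· ++ [';']) ++ curB) ++ ['('], d + 1) by simp [pvStepA]]
      rw [show pvStepB (tokA.flatMap pvClean ++ pvCleanL segs, curB, d) '('
            = (tokA.flatMap pvClean ++ pvCleanL segs, curB ++ ['('], d + 1) by simp [pvStepB]]
      rw [List.append_assoc]
      exact ih tokA segs (curB ++ ['(']) (d + 1) hs (by simp [hb])
    · by_cases h2 : ch = ')'
      · subst h2
        rw [show pvStepA (tokA, segs.flatMap (· ++ [';']) ++ curB, d) ')'
              = (tokA, (segs.flatMap (· ++ [';']) ++ curB) ++ [')'], max 0 (d - 1)) by simp [pvStepA]]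
        rw [show pvStepB (tokA.flatMap pvClean ++ pvCleanL segs, curB, d) ')'
              = (tokA.flatMap pvClean ++ pvCleanL segs, curB ++ [')'], max 0 (d - 1)) by simp [pvStepB]]
        rw [List.append_assoc]
        exact ih tokA segs (curB ++ [')']) (max 0 (d - 1)) hs (by simp [hb])
      · by_cases h3 : ch = ';'
        · subst h3
          rw [show pvStepA (tokA, segs.flatMap (· ++ [';']) ++ curB, d) ';'
                = (tokA, (segs ++ [curB]).flatMap (· ++ [';']) ++ ([] : List Char), d) by
              simp [pvStepA, List.flatMap_append]]
          rw [show pvStepB (tokA.flatMap pvClean ++ pvCleanL segs, curB, d) ';'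
                = (tokA.flatMap pvClean ++ pvCleanL (segs ++ [curB]), ([] : List Char), d) by
              simp only [pvStepB, if_neg (by decide : ¬ (';' : Char) = '('),
                if_neg (by decide : ¬ (';' : Char) = ')')]
              rw [pvFlushB]
              simp [pvCleanL, List.filter_append]]
          exact ih tokA (segs ++ [curB]) [] d
            (by intro t ht
                rcases List.mem_append.mp ht with hh | hh
                · exact hs t hh
                · simp at hh; subst hh; exact hb)
            (by simp)
        · by_cases h4 : ch = ',' ∧ d = 0
          · obtain ⟨rfl, rfl⟩ := h4
            rw [show pvStepA (tokA, segs.flatMap (· ++ [';']) ++ curB, (0:Int)) ','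
                  = ((if PySem.Chars.strip (segs.flatMap (· ++ [';']) ++ curB) ≠ [] then
                        tokA ++ [PySem.Chars.strip (segs.flatMap (· ++ [';']) ++ curB)] else tokA),
                     ([] : List (List Char)).flatMap (· ++ [';']) ++ ([] : List Char), (0:Int)) by
                simp [pvStepA]]
            rw [show pvStepB (tokA.flatMap pvClean ++ pvCleanL segs, curB, (0:Int)) ','
                  = ((if PySem.Chars.strip (segs.flatMap (· ++ [';']) ++ curB) ≠ [] then
                        tokA ++ [PySem.Chars.strip (segs.flatMap (· ++ [';']) ++ curB)] else tokA).flatMap pvClean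
                      ++ pvCleanL ([] : List (List Char)), ([] : List Char), (0:Int)) by
                simp only [pvStepB, if_neg (by decide : ¬ (',' : Char) = '('),
                  if_neg (by decide : ¬ (',' : Char) = ')')]
                rw [pvFlushB, pvFlushA, pvClean_decomp segs curB hs hb]
                simp [pvCleanL]]
            exact ih _ [] [] 0 (by simp) (by simp)
          · rw [show pvStepA (tokA, segs.flatMap (· ++ [';']) ++ curB, d) ch
                  = (tokA, (segs.flatMap (· ++ [';']) ++ curB) ++ [ch], d) by
                simp [pvStepA, h1, h2, h4]]
            rw [show pvStepB (tokA.flatMap pvClean ++ pvCleanL segs, curB, d) ch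
                  = (tokA.flatMap pvClean ++ pvCleanL segs, curB ++ [ch], d) by
                simp [pvStepB, h1, h2, h3, h4]]
            rw [List.append_assoc]
            exact ih tokA segs (curB ++ [ch]) d hs
              (by intro hmem
                  rcases List.mem_append.mp hmem with hh | hh
                  · exact hb hh
                  · simp at hh; exact h3 hh.symm)

-- the marked list as a pure recursion, and the fold computing it
def pvMarkL : List Char → Int → List Char
  | [], _ => []
  | ch :: cs, d =>
    if ch = '(' then ch :: pvMarkL cs (d + 1)
    else if ch = ')' then ch :: pvMarkL cs (max 0 (d - 1))
    else if (ch = ',' ∧ d = 0) ∨ ch = ';' then '\x00' :: pvMarkL cs d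
    else ch :: pvMarkL cs d

theorem pvMark_fold (cs : List Char) : ∀ (acc : List Char) (d : Int),
    (cs.foldl pvMark (acc, d)).1 = acc ++ pvMarkL cs d := by
  induction cs with
  | nil => intro acc d; simp [pvMarkL]
  | cons ch cs ih =>
    intro acc d
    simp only [List.foldl_cons]
    by_cases h1 : ch = '('
    · subst h1; rw [show pvMark (acc, d) '(' = (acc ++ ['('], d + 1) by simp [pvMark], ih]
      simp [pvMarkL]
    · by_cases h2 : ch = ')'
      · subst h2; rw [show pvMark (acc, d) ')' = (acc ++ [')'], max 0 (d - 1)) by simp [pvMark], ih]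
        simp [pvMarkL]
      · by_cases h3 : (ch = ',' ∧ d = 0) ∨ ch = ';'
        · rw [show pvMark (acc, d) ch = (acc ++ ['\x00'], d) by simp [pvMark, h1, h2, h3], ih]
          simp [pvMarkL, h1, h2, h3]
        · rw [show pvMark (acc, d) ch = (acc ++ [ch], d) by simp [pvMark, h1, h2, h3], ih]
          simp [pvMarkL, h1, h2, h3]

-- the single-pass tokenizer refines B's mark-then-split
theorem pvRunB (cs : List Char) : ∀ (out : List (List Char)) (buf : List Char) (d : Int),
    '\x00' ∉ buf → (∀ c ∈ cs, c ≠ '\x00') →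
    (let st := cs.foldl pvStepB (out, buf, d)
     pvFinishB st.1 st.2.1)
      = (out ++ pvCleanL (List.splitOnP (· == '\x00') (buf ++ pvMarkL cs d))).map String.ofList := by
  induction cs with
  | nil =>
    intro out buf d hb _
    simp only [List.foldl_nil, pvMarkL, List.append_nil]
    rw [List.splitOnP_eq_single _ _ (fun x hx => by simp; rintro rfl; exact hb hx)]
    unfold pvFinishB
    rw [pvFlushB]
  | cons ch cs ih =>
    intro out buf d hb hcs
    have hch : ch ≠ '\x00' := hcs ch (by simp)
    have hcs' : ∀ c ∈ cs, c ≠ '\x00' := fun c hc => hcs c (by simp [hc])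
    simp only [List.foldl_cons]
    by_cases h1 : ch = '('
    · subst h1
      rw [show pvStepB (out, buf, d) '(' = (out, buf ++ ['('], d + 1) by simp [pvStepB],
          ih out (buf ++ ['(']) (d + 1) (by simp [hb]) hcs']
      simp [pvMarkL]
    · by_cases h2 : ch = ')'
      · subst h2
        rw [show pvStepB (out, buf, d) ')' = (out, buf ++ [')'], max 0 (d - 1)) by simp [pvStepB],
            ih out (buf ++ [')']) (max 0 (d - 1)) (by simp [hb]) hcs']
        simp [pvMarkL]
      · by_cases h3 : (ch = ',' ∧ d = 0) ∨ ch = ';'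
        · rw [show pvStepB (out, buf, d) ch = (out ++ pvCleanL [buf], [], d) by
              simp only [pvStepB, if_neg h1, if_neg h2, if_pos h3]
              rw [pvFlushB],
            ih (out ++ pvCleanL [buf]) [] d (by simp) hcs']
          rw [show pvMarkL (ch :: cs) d = '\x00' :: pvMarkL cs d by
              simp [pvMarkL, h1, h2, h3]]
          rw [List.splitOnP_first _ _ (fun x hx => by simp; rintro rfl; exact hb hx) _ (by simp)]
          simp only [pvCleanL, List.map_cons, List.filter_cons, List.map_append,
            List.map_nil, List.filter_nil]
          by_cases hx : PySem.Chars.strip buf = [] <;> simp [hx]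
        · rw [show pvStepB (out, buf, d) ch = (out, buf ++ [ch], d) by
              simp [pvStepB, h1, h2, h3],
              ih out (buf ++ [ch]) d (by simp [hb]; exact fun h => hch h.symm) hcs']
          rw [show pvMarkL (ch :: cs) d = ch :: pvMarkL cs d by
              simp [pvMarkL, h1, h2, h3]]
          simp

-- ===== VERDICT (by name: the statement is the Claim_ definition above) =====
theorem split_skill_tokens_spec : Claim_equal_split_skill_tokens := by
  intro s hdom
  have hnn : ∀ c ∈ s.toList, c ≠ '\x00' := by
    intro c hc
    have hall : pvDomChar c = true := by
      have := hdom
      unfold Dom_split_skill_tokens pvDomStr at this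
      exact (List.all_eq_true.mp this) c hc
    rintro rfl
    exact absurd hall (by decide)
  show _ = _
  have hA := pvMain s.toList [] [] [] 0 (by simp) (by simp)
  have hB := pvRunB s.toList [] [] 0 (by simp) hnn
  simp only [List.flatMap_nil, List.nil_append] at hA hB
  simp only [split_skill_tokens, split_skill_tokens_alt]
  rw [pvMark_fold s.toList [] 0, List.nil_append, pvSplitOn_eq]
  exact hA.trans hB
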